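-- pv_equiv track=rewrite | github.com/justgus/CumberlandWriter | transform_hexagon.py | split_path_into_subpaths
-- ===== SOURCE A (Python) =====
-- def split_path_into_subpaths(commands):
--     """Split commands at each M (move) command."""
--     subpaths = []
--     current = []
--
--     for cmd in commands:
--         if cmd[0] == 'M' and current:
--             subpaths.append(current)
--             current = [cmd]
--         else:
--             current.append(cmd)
--
--     if current:
--         subpaths.append(current)
--
--     return subpaths
-- ===== SOURCE B (Python) =====
-- def split_path_into_subpaths(commands):
--     """Split commands at each M (move) command."""
--     subpaths = []
--     i = 0
--     n = len(commands)
--     while i < n: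
--         j = i + 1
--         while j < n and commands[j][0] != 'M':
--             j += 1
--         subpaths.append(commands[i:j])
--         i = j
--     return subpaths
-- ===== Notes on version B (the rewrite author's own statement) =====
-- stated objective: alternative
-- what changed: Two-pointer scan that finds the end of each subpath (the next M after its start) and slices it out in one step, instead of A's single fold that maintains and flushes a growing 'current' accumulator.
import Mathlib
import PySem

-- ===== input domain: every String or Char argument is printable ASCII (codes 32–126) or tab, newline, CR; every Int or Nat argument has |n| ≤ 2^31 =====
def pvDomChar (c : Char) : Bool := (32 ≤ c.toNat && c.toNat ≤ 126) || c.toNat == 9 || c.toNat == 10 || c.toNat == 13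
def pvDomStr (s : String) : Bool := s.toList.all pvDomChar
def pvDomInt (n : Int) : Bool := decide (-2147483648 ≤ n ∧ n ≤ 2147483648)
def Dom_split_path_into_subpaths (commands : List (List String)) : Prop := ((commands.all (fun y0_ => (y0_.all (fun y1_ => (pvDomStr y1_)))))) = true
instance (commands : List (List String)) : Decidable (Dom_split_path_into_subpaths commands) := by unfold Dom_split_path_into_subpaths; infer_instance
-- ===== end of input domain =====

-- B replaces A's accumulator fold by a two-pointer scan that slices each subpath out whole
-- (alternative decomposition, same O(n) cost).


-- ===== PORT A =====
-- one loop step of A: flush `current` when an M command starts a new subpath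
def stepA (st : List (List (List String)) × List (List String)) (cmd : List String) :
    List (List (List String)) × List (List String) :=
  if cmd.headD "" == "M" && !st.2.isEmpty then (st.1 ++ [st.2], [cmd])
  else (st.1, st.2 ++ [cmd])

def split_path_into_subpaths (commands : List (List String)) : List (List (List String)) :=
  let st := commands.foldl stepA ([], [])
  if st.2.isEmpty then st.1 else st.1 ++ [st.2]

-- ===== PORT B =====
-- inner while loop of B: number of commands before the next M (j - (i+1))
def cutLen (cmds : List (List String)) : Nat :=
  match cmds with
  | [] => 0
  | c :: cs => if c.headD "" == "M" then 0 else cutLen cs + 1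

def split_path_into_subpaths_alt (commands : List (List String)) : List (List (List String)) :=
  match commands with
  | [] => []
  | c :: cs =>
      -- slice commands[i:j] = c :: cs.take (cutLen cs), then continue at i = j
      (c :: cs.take (cutLen cs)) :: split_path_into_subpaths_alt (cs.drop (cutLen cs))
termination_by commands.length
decreasing_by simp [List.length_drop]

-- ===== PRECONDITION & SPEC =====
-- Pre_ excludes exactly the inputs on which Python A raises (IndexError on cmd[0] for an empty command)
def Pre_split_path_into_subpaths (commands : List (List String)) : Prop :=
  ∀ cmd ∈ commands, cmd ≠ []
instance (commands : List (List String)) : Decidable (Pre_split_path_into_subpaths commands) := by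
  unfold Pre_split_path_into_subpaths; infer_instance

def pvWitness_split_path_into_subpaths : List (List String) := [["M", "0", "0"], ["L", "1"], ["M", "2"]]

def Spec_split_path_into_subpaths (commands : List (List String)) (out : List (List (List String))) : Prop := out = split_path_into_subpaths_alt commands
instance (commands : List (List String)) (out : List (List (List String))) : Decidable (Spec_split_path_into_subpaths commands out) := by unfold Spec_split_path_into_subpaths; infer_instance

-- ===== CLAIM (what is proved, stated in full; the proofs are below) =====
def Claim_equal_split_path_into_subpaths : Prop := ∀ (commands : List (List String)), Dom_split_path_into_subpaths commands → Pre_split_path_into_subpaths commands → Spec_split_path_into_subpaths commands (split_path_into_subpaths commands)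

-- ===== LEMMAS AND PROOFS =====

@[simp] lemma alt_nil : split_path_into_subpaths_alt [] = [] := by
  rw [split_path_into_subpaths_alt]

lemma alt_cons (c : List String) (cs : List (List String)) :
    split_path_into_subpaths_alt (c :: cs)
    = (c :: cs.take (cutLen cs)) :: split_path_into_subpaths_alt (cs.drop (cutLen cs)) := by
  rw [split_path_into_subpaths_alt]

-- A's loop, started with a nonempty `current`, produces `current ++ (prefix up to the next M)`
-- as the next subpath and recurses exactly like B on the rest.
lemma loopA_eq (cs : List (List String)) :
    ∀ (subs : List (List (List String))) (cur : List (List String)), cur ≠ [] →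
    (let st := cs.foldl stepA (subs, cur)
     if st.2.isEmpty then st.1 else st.1 ++ [st.2])
    = subs ++ ((cur ++ cs.take (cutLen cs)) :: split_path_into_subpaths_alt (cs.drop (cutLen cs))) := by
  induction cs with
  | nil =>
      intro subs cur hcur
      simp [cutLen, List.isEmpty_iff, hcur]
  | cons c cs ih =>
      intro subs cur hcur
      by_cases hM : c.head?.getD "" = "M"
      · have h1 : stepA (subs, cur) c = (subs ++ [cur], [c]) := by
          simp [stepA, hM, hcur]
        rw [List.foldl_cons, h1, ih (subs ++ [cur]) [c] (by simp)]
        simp [cutLen, hM, alt_cons]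
      · have h1 : stepA (subs, cur) c = (subs, cur ++ [c]) := by
          simp [stepA, hM]
        rw [List.foldl_cons, h1, ih subs (cur ++ [c]) (by simp)]
        simp [cutLen, hM]

theorem split_path_into_subpaths_eq (commands : List (List String)) :
    split_path_into_subpaths commands = split_path_into_subpaths_alt commands := by
  cases commands with
  | nil => simp [split_path_into_subpaths]
  | cons c cs =>
      have h0 : stepA ([], []) c = ([], [c]) := by simp [stepA]
      unfold split_path_into_subpaths
      rw [List.foldl_cons, h0, loopA_eq cs [] [c] (by simp)]
      simp [alt_cons]

-- ===== VERDICT (by name: the statement is the Claim_ definition above) =====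
theorem split_path_into_subpaths_spec : Claim_equal_split_path_into_subpaths := by
  intro commands _ _
  exact split_path_into_subpaths_eq commands
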